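-- pv_equiv track=rewrite | github.com/fabioluisaf/queens-problem | a-star/search.py | fscore
-- ===== SOURCE A (Python) =====
-- def is_being_attacked(board, column, row):
--     n = len(board)
--
--     # if the row to be tested is not within the board, it's not being attacked
--     if row < 0 or row >= n:
--         return False
--
--     # for every other column of the board
--     for i in range(n):
--         current_row = board[i]
--         distance = abs(column - i)
--
--         # if the i-th column has a queen and is different from the parameter column
--         if current_row != -1 and i != column:
--             if current_row == row:
--                 # if the parameter row is being attacked by other queens in the same row
--                 return True
--             elif row == (current_row - distance) or row == (current_row + distance):
--                 # if the parameter row is being attacked diagonally by other queens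
--                 return True
--
--     return False
--
-- def fscore(board):
--     n = len(board)
--     h_score = 0
--     g_score = 0
--
--     for i in range(n):
--         if board[i] == -1:
--             for j in range(n):
--                 if not is_being_attacked(board, i, j):
--                     h_score += 1
--
--         else:
--             g_score += 1
--
--     return h_score + g_score
-- ===== SOURCE B (Python) =====
-- def fscore(board):
--     n = len(board)
--     placed = [(c, r) for c, r in enumerate(board) if r != -1]
--     h = 0
--     for i in range(n):
--         if board[i] != -1:
--             continue
--         bad = set()
--         for c, r in placed:
--             d = abs(c - i)
--             bad.add(r)
--             bad.add(r - d)
--             bad.add(r + d)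
--         for j in range(n):
--             if j not in bad:
--                 h += 1
--     return h + len(placed)
-- ===== Notes on version B (the rewrite author's own statement) =====
-- stated objective: alternative
-- what changed: Instead of testing every (column,row) cell against all queens via is_being_attacked, B collects the placed queens once and, for each empty column, builds the set of attacked rows (same row and the two diagonal offsets per queen) and counts the rows missing from it.
import Mathlib
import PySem

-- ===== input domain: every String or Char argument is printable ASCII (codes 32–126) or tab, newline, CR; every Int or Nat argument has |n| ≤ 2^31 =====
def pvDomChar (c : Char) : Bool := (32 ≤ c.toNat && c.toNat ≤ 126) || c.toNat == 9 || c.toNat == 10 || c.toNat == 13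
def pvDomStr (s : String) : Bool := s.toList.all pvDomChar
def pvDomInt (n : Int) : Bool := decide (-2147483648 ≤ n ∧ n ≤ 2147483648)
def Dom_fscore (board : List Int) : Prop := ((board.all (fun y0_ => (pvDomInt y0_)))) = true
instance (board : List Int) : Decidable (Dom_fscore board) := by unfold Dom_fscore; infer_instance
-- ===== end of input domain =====

-- B replaces the per-row scan over all queens by one attacked-row set per empty
-- column, built once from the placed queens; objective: alternative decomposition.

-- ===== PORT A =====
def isBeingAttacked (board : List Int) (column row : Int) : Bool :=
  let n : Int := board.length
  if row < 0 || n ≤ row then false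
  else
    (PySem.List.pyRange 0 n 1).any (fun i =>
      let current_row := PySem.List.pyGetD board i 0
      let distance := |column - i|
      if current_row != -1 && i != column then
        if current_row == row then true
        else if row == current_row - distance || row == current_row + distance then true
        else false
      else false)

def fscore (board : List Int) : Int :=
  let n : Int := board.length
  let hg := (PySem.List.pyRange 0 n 1).foldl (fun (hg : Int × Int) i =>
    if PySem.List.pyGetD board i 0 == -1 then
      ((PySem.List.pyRange 0 n 1).foldl (fun h j =>
        if !(isBeingAttacked board i j) then h + 1 else h) hg.1, hg.2)
    else (hg.1, hg.2 + 1)) (0, 0)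
  hg.1 + hg.2

-- ===== PORT B =====
def fscore_alt (board : List Int) : Int :=
  let n : Int := board.length
  let placed := (PySem.List.enumerate board).filter (fun p => p.2 != -1)
  let h := (PySem.List.pyRange 0 n 1).foldl (fun h i =>
    if PySem.List.pyGetD board i 0 != -1 then h
    else
      let bad := placed.foldl (fun (bad : PySem.Set Int) p =>
        let d := |p.1 - i|
        ((bad.add p.2).add (p.2 - d)).add (p.2 + d)) PySem.Set.empty
      (PySem.List.pyRange 0 n 1).foldl (fun h j =>
        if !(bad.contains j) then h + 1 else h) h) 0
  h + placed.length

-- ===== PRECONDITION & SPEC =====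
def Spec_fscore (board : List Int) (out : Int) : Prop := out = fscore_alt board
instance (board : List Int) (out : Int) : Decidable (Spec_fscore board out) := by unfold Spec_fscore; infer_instance

-- ===== CLAIM (what is proved, stated in full; the proofs are below) =====
def Claim_equal_fscore : Prop := ∀ (board : List Int), Dom_fscore board → Spec_fscore board (fscore board)

-- ===== LEMMAS AND PROOFS =====

-- membership in the attacked-row set built by B's inner fold
lemma mem_badfold (ps : List (Int × Int)) (s : PySem.Set Int) (i j : Int) :
    (j ∈ ps.foldl (fun (bad : PySem.Set Int) p =>
        ((bad.add p.2).add (p.2 - |p.1 - i|)).add (p.2 + |p.1 - i|)) s) ↔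
    j ∈ s ∨ ∃ p ∈ ps, j = p.2 ∨ j = p.2 - |p.1 - i| ∨ j = p.2 + |p.1 - i| := by
  induction ps generalizing s with
  | nil => simp
  | cons p ps ih =>
    rw [List.foldl_cons, ih]
    simp only [PySem.Set.mem_add, List.mem_cons]
    constructor
    · rintro ((((h | h) | h) | h) | ⟨q, hq, h⟩)
      · exact Or.inl h
      · exact Or.inr ⟨p, Or.inl rfl, Or.inl h⟩
      · exact Or.inr ⟨p, Or.inl rfl, Or.inr (Or.inl h)⟩
      · exact Or.inr ⟨p, Or.inl rfl, Or.inr (Or.inr h)⟩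
      · exact Or.inr ⟨q, Or.inr hq, h⟩
    · rintro (h | ⟨q, (rfl | hq), h⟩)
      · exact Or.inl (Or.inl (Or.inl (Or.inl h)))
      · rcases h with h | h | h
        · exact Or.inl (Or.inl (Or.inl (Or.inr h)))
        · exact Or.inl (Or.inl (Or.inr h))
        · exact Or.inl (Or.inr h)
      · exact Or.inr ⟨q, hq, h⟩

lemma mem_placed (board : List Int) (p : Int × Int) :
    p ∈ (PySem.List.enumerate board).filter (fun p => p.2 != -1) ↔
    ∃ (k : Nat) (h : k < board.length), p = ((k : Int), board[k]) ∧ board[k] ≠ -1 := by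
  simp only [List.mem_filter, PySem.List.mem_enumerate_iff]
  constructor
  · rintro ⟨⟨k, hk, rfl⟩, hne⟩
    refine ⟨k, hk, by simp, by simpa using hne⟩
  · rintro ⟨k, hk, rfl, hne⟩
    exact ⟨⟨k, hk, by simp⟩, by simpa using hne⟩

-- pointwise: A's per-row attack test equals membership in B's attacked set
lemma attacked_eq (board : List Int) (i j : Int)
    (hbi : PySem.List.pyGetD board i 0 = -1)
    (hj0 : 0 ≤ j) (hjn : j < (board.length : Int)) :
    isBeingAttacked board i j =
      (((PySem.List.enumerate board).filter (fun p => p.2 != -1)).foldl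
        (fun (bad : PySem.Set Int) p =>
          ((bad.add p.2).add (p.2 - |p.1 - i|)).add (p.2 + |p.1 - i|)) PySem.Set.empty).contains j := by
  have h1 : ¬ j < 0 := by omega
  have h2 : ¬ (board.length : Int) ≤ j := by omega
  have hL : isBeingAttacked board i j = true ↔ ∃ c : Int, (0 ≤ c ∧ c < (board.length : Int)) ∧
      ((PySem.List.pyGetD board c 0 ≠ -1 ∧ c ≠ i) ∧
       (PySem.List.pyGetD board c 0 = j ∨ j = PySem.List.pyGetD board c 0 - |i - c| ∨
        j = PySem.List.pyGetD board c 0 + |i - c|)) := by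
    unfold isBeingAttacked
    simp [h1, h2, List.any_eq_true, PySem.List.mem_pyRange_one, and_assoc]
  have hR : (((PySem.List.enumerate board).filter (fun p => p.2 != -1)).foldl
      (fun (bad : PySem.Set Int) p =>
        ((bad.add p.2).add (p.2 - |p.1 - i|)).add (p.2 + |p.1 - i|)) PySem.Set.empty).contains j = true ↔
      ∃ p ∈ (PySem.List.enumerate board).filter (fun p => p.2 != -1),
        j = p.2 ∨ j = p.2 - |p.1 - i| ∨ j = p.2 + |p.1 - i| := by
    rw [PySem.Set.contains_iff, mem_badfold]
    simp [PySem.Set.empty]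
  rw [Bool.eq_iff_iff, hL, hR]
  constructor
  · rintro ⟨c, ⟨hc0, hcn⟩, ⟨hne, hci⟩, hmatch⟩
    refine ⟨(c, PySem.List.pyGetD board c 0), ?_, ?_⟩
    · rw [mem_placed]
      refine ⟨c.toNat, by omega, ?_, ?_⟩
      · rw [PySem.List.pyGetD_eq_getElem _ _ hc0 (by omega)]
        simp [Int.toNat_of_nonneg hc0]
      · rw [PySem.List.pyGetD_eq_getElem _ _ hc0 (by omega)] at hne
        exact hne
    · simp only [abs_sub_comm c i]
      rcases hmatch with h | h | h
      · exact Or.inl h.symm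
      · exact Or.inr (Or.inl (by rw [h, abs_sub_comm]))
      · exact Or.inr (Or.inr (by rw [h, abs_sub_comm]))
  · rintro ⟨p, hp, hmatch⟩
    rw [mem_placed] at hp
    rcases hp with ⟨k, hk, rfl, hne⟩
    have hget : PySem.List.pyGetD board (k : Int) 0 = board[k] := by
      rw [PySem.List.pyGetD_eq_getElem _ _ (by omega) (by exact_mod_cast hk)]
      simp
    refine ⟨(k : Int), ⟨by omega, by exact_mod_cast hk⟩, ⟨?_, ?_⟩, ?_⟩
    · rw [hget]; exact hne
    · intro hki
      rw [hki] at hget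
      rw [hbi] at hget
      exact hne hget.symm
    · simp only [hget]
      rcases hmatch with h | h | h
      · exact Or.inl h.symm
      · exact Or.inr (Or.inl (by rw [h, abs_sub_comm]))
      · exact Or.inr (Or.inr (by rw [h, abs_sub_comm]))

-- the g accumulator counts the placed queens
lemma gfold_eq : ∀ (board : List Int) (s a : Int),
    board.foldl (fun g v => if v == -1 then g else g + 1) a =
    a + (((PySem.List.enumerate board s).filter (fun p => p.2 != -1)).length : Int) := by
  intro board
  induction board with
  | nil => intro s a; simp [PySem.List.enumerate_nil]
  | cons x xs ih =>
    intro s a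
    rw [List.foldl_cons, PySem.List.enumerate_cons, List.filter_cons]
    by_cases hx : x = -1
    · subst hx
      rw [if_pos (show ((-1 : Int) == -1) = true by decide),
          if_neg (show ¬ (((-1 : Int)) != -1) = true by decide)]
      exact ih (s + 1) a
    · have hbe : (x == -1) = false := by simpa using hx
      have hbn : (x != -1) = true := by simpa using hx
      rw [if_neg (by simp [hbe]), if_pos hbn, List.length_cons]
      rw [ih (s + 1) (a + 1)]
      push_cast
      ring

-- ===== VERDICT (by name: the statement is the Claim_ definition above) =====
theorem fscore_spec : Claim_equal_fscore := by
  intro board _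
  unfold Spec_fscore
  simp only [fscore, fscore_alt]
  rw [PySem.List.foldl_congr_mem _ _
      (fun (hg : Int × Int) i =>
        (if PySem.List.pyGetD board i 0 == -1 then
          (PySem.List.pyRange 0 (board.length : Int) 1).foldl
            (fun h j => if !(isBeingAttacked board i j) then h + 1 else h) hg.1
         else hg.1,
         if PySem.List.pyGetD board i 0 == -1 then hg.2 else hg.2 + 1))
      (0, 0)
      (by
        intro acc x hx
        by_cases hc : PySem.List.pyGetD board x 0 == -1 <;> simp [hc])]
  rw [PySem.List.foldl_prod_mk
      (f := fun h i => if PySem.List.pyGetD board i 0 == -1 then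
          (PySem.List.pyRange 0 (board.length : Int) 1).foldl
            (fun h j => if !(isBeingAttacked board i j) then h + 1 else h) h
        else h)
      (g := fun g i => if PySem.List.pyGetD board i 0 == -1 then g else g + 1)]
  -- g component
  have hg : (PySem.List.pyRange 0 (board.length : Int) 1).foldl
      (fun g i => if PySem.List.pyGetD board i 0 == -1 then g else g + 1) 0 =
      (((PySem.List.enumerate board).filter (fun p => p.2 != -1)).length : Int) := by
    refine Eq.trans (PySem.List.foldl_pyRange_zero_pyGetD' board 0
      (fun g v => if v == -1 then g else g + 1) 0) ?_
    rw [gfold_eq board 0 0]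
    simp
  -- h component
  have hh : (PySem.List.pyRange 0 (board.length : Int) 1).foldl
      (fun (h : Int) i => if PySem.List.pyGetD board i 0 == -1 then
          (PySem.List.pyRange 0 (board.length : Int) 1).foldl
            (fun h j => if !(isBeingAttacked board i j) then h + 1 else h) h
        else h) 0 =
      (PySem.List.pyRange 0 (board.length : Int) 1).foldl
      (fun (h : Int) i => if PySem.List.pyGetD board i 0 != -1 then h
        else
          (PySem.List.pyRange 0 (board.length : Int) 1).foldl
            (fun h j => if !((((PySem.List.enumerate board).filter (fun p => p.2 != -1)).foldl
              (fun (bad : PySem.Set Int) p =>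
                ((bad.add p.2).add (p.2 - |p.1 - i|)).add (p.2 + |p.1 - i|))
              PySem.Set.empty).contains j) then h + 1 else h) h) 0 := by
    apply PySem.List.foldl_congr_mem
    intro acc i hi
    by_cases hc : PySem.List.pyGetD board i 0 = -1
    · simp only [hc, beq_self_eq_true, if_true, show ((-1 : Int) != -1) = false by simp]
      apply PySem.List.foldl_congr_mem
      intro h j hj
      rw [PySem.List.mem_pyRange_one] at hj
      rw [attacked_eq board i j hc hj.1 hj.2]
    · simp [hc]
  dsimp only
  exact congrArg₂ (· + ·) hh hg
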